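-- pv_equiv track=rewrite | github.com/The-dEnd/PoinconLab | models/traitement_json.py | determine_category_and_subcategory
-- ===== SOURCE A (Python) =====
-- def determine_category_and_subcategory(die_visible_values):
--     if len(die_visible_values) == 1:
--         category = "seul"
--         subcategory = "visible" if die_visible_values[0] == 1 else "nonvisible"
--     else:
--         category = "plusieurs"
--         if all(value == 1 for value in die_visible_values):
--             subcategory = "visible"
--         elif all(value == 0 for value in die_visible_values):
--             subcategory = "nonvisible"
--         else:
--             subcategory = "deux"
--     return category, subcategory
-- ===== SOURCE B (Python) =====
-- def determine_category_and_subcategory(die_visible_values):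
--     if len(die_visible_values) == 1:
--         return ("seul", "visible" if die_visible_values[0] == 1 else "nonvisible")
--     # single pass: a 4-state machine replaces A's two staged all() scans
--     state = "empty"
--     for v in die_visible_values:
--         if state == "mixed":
--             break
--         if state == "empty":
--             state = "ones" if v == 1 else ("zeros" if v == 0 else "mixed")
--         elif state == "ones":
--             if v != 1:
--                 state = "mixed"
--         else:  # zeros
--             if v != 0:
--                 state = "mixed"
--     sub = {"empty": "visible", "ones": "visible",
--            "zeros": "nonvisible", "mixed": "deux"}[state]
--     return ("plusieurs", sub)
-- ===== Notes on version B (the rewrite author's own statement) =====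
-- stated objective: alternative
-- what changed: A's two staged all()-scans in the else branch are replaced by a single left-to-right pass driving a 4-state machine (empty/ones/zeros/mixed, with early exit on mixed), whose final state is mapped to the subcategory; the seul case returns directly.
import Mathlib
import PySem

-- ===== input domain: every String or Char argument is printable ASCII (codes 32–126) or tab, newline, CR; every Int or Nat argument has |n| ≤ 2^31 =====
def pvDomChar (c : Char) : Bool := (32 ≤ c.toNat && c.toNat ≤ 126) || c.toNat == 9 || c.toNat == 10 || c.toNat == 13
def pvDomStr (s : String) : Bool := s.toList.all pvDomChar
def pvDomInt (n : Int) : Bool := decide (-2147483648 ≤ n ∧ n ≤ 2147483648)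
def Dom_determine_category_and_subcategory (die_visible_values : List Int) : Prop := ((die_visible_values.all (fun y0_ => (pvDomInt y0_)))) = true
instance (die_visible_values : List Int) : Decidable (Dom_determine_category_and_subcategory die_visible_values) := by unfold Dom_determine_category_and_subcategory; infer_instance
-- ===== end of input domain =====

-- B: replaces the else-branch's two staged all() scans by one left-to-right pass over a 4-state machine (alternative decomposition, same cost).


-- ===== PORT A =====
def determine_category_and_subcategory (die_visible_values : List Int) : String × String :=
  if die_visible_values.length = 1 then
    ("seul", if PySem.List.pyGetD die_visible_values 0 0 = 1 then "visible" else "nonvisible")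
  else
    ("plusieurs",
      if die_visible_values.all (fun value => value == 1) then "visible"
      else if die_visible_values.all (fun value => value == 0) then "nonvisible"
      else "deux")

-- ===== PORT B =====
inductive PvSt | empty | ones | zeros | mixed
deriving DecidableEq, Repr

-- one step of Source B's loop body (the 'break' on mixed is modelled by mixed being absorbing)
def pvStep (st : PvSt) (v : Int) : PvSt :=
  match st with
  | .mixed => .mixed
  | .empty => if v = 1 then .ones else if v = 0 then .zeros else .mixed
  | .ones  => if v ≠ 1 then .mixed else .ones
  | .zeros => if v ≠ 0 then .mixed else .zeros

def pvFinal (st : PvSt) : String :=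
  match st with
  | .empty => "visible"
  | .ones  => "visible"
  | .zeros => "nonvisible"
  | .mixed => "deux"

def determine_category_and_subcategory_alt (die_visible_values : List Int) : String × String :=
  if die_visible_values.length = 1 then
    ("seul", if PySem.List.pyGetD die_visible_values 0 0 = 1 then "visible" else "nonvisible")
  else
    ("plusieurs", pvFinal (die_visible_values.foldl pvStep .empty))

-- ===== PRECONDITION & SPEC =====
def Spec_determine_category_and_subcategory (die_visible_values : List Int) (out : String × String) : Prop := out = determine_category_and_subcategory_alt die_visible_values
instance (die_visible_values : List Int) (out : String × String) : Decidable (Spec_determine_category_and_subcategory die_visible_values out) := by unfold Spec_determine_category_and_subcategory; infer_instance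

-- ===== CLAIM (what is proved, stated in full; the proofs are below) =====
def Claim_equal_determine_category_and_subcategory : Prop := ∀ (die_visible_values : List Int), Dom_determine_category_and_subcategory die_visible_values → Spec_determine_category_and_subcategory die_visible_values (determine_category_and_subcategory die_visible_values)

-- ===== LEMMAS AND PROOFS =====
lemma pvFoldl_mixed (l : List Int) : l.foldl pvStep .mixed = .mixed := by
  induction l with
  | nil => rfl
  | cons v t ih => simpa [pvStep] using ih

lemma pvFoldl_ones (l : List Int) :
    l.foldl pvStep .ones = if l.all (fun v => v == 1) then .ones else .mixed := by
  induction l with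
  | nil => rfl
  | cons v t ih =>
    by_cases h : v = 1
    · simpa [pvStep, h] using ih
    · simp [pvStep, h, pvFoldl_mixed]

lemma pvFoldl_zeros (l : List Int) :
    l.foldl pvStep .zeros = if l.all (fun v => v == 0) then .zeros else .mixed := by
  induction l with
  | nil => rfl
  | cons v t ih =>
    by_cases h : v = 0
    · simpa [pvStep, h] using ih
    · simp [pvStep, h, pvFoldl_mixed]

lemma pvFinal_empty (l : List Int) :
    pvFinal (l.foldl pvStep .empty) =
      (if l.all (fun v => v == 1) then "visible"
       else if l.all (fun v => v == 0) then "nonvisible" else "deux") := by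
  cases l with
  | nil => rfl
  | cons v t =>
    by_cases h1 : v = 1
    · simp [pvStep, h1, pvFoldl_ones, pvFinal]
      split_ifs <;> rfl
    · by_cases h0 : v = 0
      · simp [pvStep, h0, pvFoldl_zeros, pvFinal]
        split_ifs <;> rfl
      · simp [pvStep, h1, h0, pvFoldl_mixed, pvFinal]

-- ===== VERDICT (by name: the statement is the Claim_ definition above) =====
theorem determine_category_and_subcategory_spec : Claim_equal_determine_category_and_subcategory := by
  intro l _
  unfold Spec_determine_category_and_subcategory determine_category_and_subcategory
    determine_category_and_subcategory_alt
  rw [pvFinal_empty]
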